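-- pv_equiv track=rewrite | github.com/leewontae0/COM2005 | proj4/enhanced_second_chance_page_replacement.py | page_replace
-- ===== SOURCE A (Python) =====
-- def page_replace(size, pages):
--
--     SIZE = size
--     memory = []
--     faults = 0
--
--     for page in pages:
--
--         inMemory = False
--         for p, r, m in memory:
--             if p == page:
--                 inMemory = True
--                 break
--
--         if not inMemory and len(memory) < SIZE:
--
--             memory.append([page, 1, 0])
--             faults += 1
--
--         elif not inMemory and len(memory) == SIZE:
--
--             temp = []
--
--             for i in range(len(memory)):
--
--                 elem = [memory[i] + [i]]
--                 temp += elem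
--             temp = sorted(temp, key=lambda x: (x[1], x[2], x[3]))
--
--             targetElem = [temp[0][0], temp[0][1], temp[0][2]]
--
--             idx = memory.index(targetElem)
--
--             if targetElem[1] == 1:
--
--                 for i in range(len(memory)):
--
--                     memory[i][1] = 0
--
--             for _ in range(idx):
--
--                 tempElem = [memory[0][0], 0, memory[0][2]]
--                 memory.pop(0)
--                 memory.append(tempElem)
--
--             memory.pop(0)
--             tempElem = [page, 1, 0]
--             memory.append(tempElem)
--
--             faults += 1
--
--
--         else:
--
--             for i in range(len(memory)):
--
--                 if memory[i][0] == page: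
--
--                     memory[i][1] = 1
--
--     return faults
-- ===== SOURCE B (Python) =====
-- def page_replace(size, pages):
--     # Enhanced second-chance simulation keeping (page, refbit) frames.
--     # Victim = first frame with refbit 0 (else frame 0, after clearing all bits);
--     # memory is rebuilt by slicing instead of sort + pop(0)/append rotation.
--     memory = []          # list of [page, refbit]
--     faults = 0
--     for page in pages:
--         hit = False
--         for f in memory:
--             if f[0] == page:
--                 f[1] = 1
--                 hit = True
--                 break
--         if hit:
--             continue
--         if len(memory) < size:
--             memory.append([page, 1])
--             faults += 1
--         elif len(memory) == size:
--             victim = next((i for i, f in enumerate(memory) if f[1] == 0), 0)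
--             if memory[victim][1] == 1:
--                 for f in memory:
--                     f[1] = 0
--             memory = (memory[victim + 1:]
--                       + [[f[0], 0] for f in memory[:victim]]
--                       + [[page, 1]])
--             faults += 1
--     return faults
-- ===== Notes on version B (the rewrite author's own statement) =====
-- stated objective: simpler
-- what changed: B keeps (page, refbit) frames and picks the victim by a direct first-zero-bit scan (index 0 after clearing all bits when none is zero), rebuilding memory by list slicing, instead of A's enumerate-append temp list, sort by (refbit, modbit, index), list.index lookup and pop(0)/append rotation loop.
import Mathlib
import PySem

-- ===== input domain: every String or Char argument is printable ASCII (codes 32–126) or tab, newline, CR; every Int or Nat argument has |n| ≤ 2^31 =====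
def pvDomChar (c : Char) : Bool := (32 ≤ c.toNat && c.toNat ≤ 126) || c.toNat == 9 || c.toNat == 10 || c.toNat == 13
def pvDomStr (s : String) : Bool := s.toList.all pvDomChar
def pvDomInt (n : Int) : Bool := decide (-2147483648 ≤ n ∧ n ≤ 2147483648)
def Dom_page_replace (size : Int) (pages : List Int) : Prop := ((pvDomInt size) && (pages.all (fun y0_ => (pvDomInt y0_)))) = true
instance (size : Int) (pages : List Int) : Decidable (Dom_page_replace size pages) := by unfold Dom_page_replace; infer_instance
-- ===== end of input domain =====

-- B replaces A's temp-list sort and pop(0)/append rotation by a direct first-zero-bit scan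
-- and a slice-based rebuild of the frame list (objective: simpler; equivalence is on the return value).

-- ===== PORT A =====
-- frames are triples (page, refbit, modbit); a fault step appends (page, 1, 0)

-- Python's tuple key (x[1], x[2], x[3]) — lexicographic, hence the ×ₗ order
def pvKeyA (x : Int × Int × Int × Int) : Int ×ₗ (Int ×ₗ Int) :=
  toLex (x.2.1, toLex (x.2.2.1, x.2.2.2))

-- the 'for _ in range(idx): tempElem = [memory[0][0], 0, memory[0][2]]; pop(0); append' loop
def pvRotA : Nat → List (Int × Int × Int) → List (Int × Int × Int)
  | 0, m => m
  | k+1, m =>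
    pvRotA k (match m with
      | [] => []                        -- Python would raise IndexError; never reached (m nonempty)
      | h :: t => t ++ [(h.1, 0, h.2.2)])

def pvStepA (SIZE : Int) (st : List (Int × Int × Int) × Int) (page : Int) :
    List (Int × Int × Int) × Int :=
  let memory := st.1
  let inMemory := memory.any (fun f => f.1 == page)
  if inMemory = false ∧ (memory.length : Int) < SIZE then
    (memory ++ [(page, 1, 0)], st.2 + 1)
  else if inMemory = false ∧ (memory.length : Int) = SIZE then
    let temp :=
      (PySem.List.pyRange 0 (memory.length : Int)).foldl
        (fun acc i =>
          acc ++ [(let e := PySem.List.pyGetD memory i (0, 0, 0); (e.1, e.2.1, e.2.2, i))]) []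
    let temp := PySem.List.sorted temp pvKeyA
    match temp with
    | [] => (memory, st.2)              -- Python: temp[0] raises IndexError here (outside Pre_)
    | t0 :: _ =>
      let targetElem : Int × Int × Int := (t0.1, t0.2.1, t0.2.2.1)
      let idx := (PySem.List.index? memory targetElem).getD 0
      let memory := if t0.2.1 = 1 then memory.map (fun f => (f.1, 0, f.2.2)) else memory
      let memory := pvRotA idx memory
      match memory with
      | [] => ([(page, 1, 0)], st.2 + 1)  -- Python: pop(0) would raise; never reached
      | _ :: rest => (rest ++ [(page, 1, 0)], st.2 + 1)
  else
    (memory.map (fun f => if f.1 = page then (f.1, 1, f.2.2) else f), st.2)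

def page_replace (size : Int) (pages : List Int) : Int :=
  (pages.foldl (pvStepA size) ([], 0)).2

-- ===== PORT B =====
-- frames are pairs (page, refbit); the hit loop sets the first matching frame's bit

def pvMarkHit (page : Int) : List (Int × Int) → Option (List (Int × Int))
  | [] => none
  | f :: rest =>
    if f.1 = page then some ((f.1, 1) :: rest)
    else (pvMarkHit page rest).map (f :: ·)

def pvStepB (size : Int) (st : List (Int × Int) × Int) (page : Int) : List (Int × Int) × Int :=
  match pvMarkHit page st.1 with
  | some m => (m, st.2)
  | none =>
    let memory := st.1
    if (memory.length : Int) < size then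
      (memory ++ [(page, 1)], st.2 + 1)
    else if (memory.length : Int) = size then
      -- victim = next((i for i, f in enumerate(memory) if f[1] == 0), 0)
      let v := (memory.findIdx? (fun f => f.2 == 0)).getD 0
      match PySem.List.pyGet? memory (v : Int) with
      | none => (memory, st.2)          -- Python: memory[victim] raises IndexError (size = 0; outside Pre_)
      | some fv =>
        let memory := if fv.2 = 1 then memory.map (fun f => (f.1, 0)) else memory
        (memory.drop (v+1) ++ (memory.take v).map (fun f => (f.1, 0)) ++ [(page, 1)], st.2 + 1)
    else (memory, st.2)

def page_replace_alt (size : Int) (pages : List Int) : Int :=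
  (pages.foldl (pvStepB size) ([], 0)).2

-- ===== PRECONDITION & SPEC =====
-- Pre_ excludes size = 0 with a nonempty reference string, where A raises IndexError (temp[0] on
-- the empty frame list; B raises IndexError there too); A returns normally on every other input.
def Pre_page_replace (size : Int) (pages : List Int) : Prop := size ≠ 0 ∨ pages = []
instance (size : Int) (pages : List Int) : Decidable (Pre_page_replace size pages) := by
  unfold Pre_page_replace; infer_instance
def pvWitness_page_replace : Int × List Int := (2, [1, 2, 3, 1, 4])

def Spec_page_replace (size : Int) (pages : List Int) (out : Int) : Prop :=
  out = page_replace_alt size pages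
instance (size : Int) (pages : List Int) (out : Int) : Decidable (Spec_page_replace size pages out) := by
  unfold Spec_page_replace; infer_instance

-- ===== CLAIM (what is proved, stated in full; the proof is below) =====
def Claim_equal_page_replace : Prop := ∀ (size : Int) (pages : List Int),
  Dom_page_replace size pages → Pre_page_replace size pages →
  Spec_page_replace size pages (page_replace size pages)

-- ===== LEMMAS AND PROOFS =====

-- B's frames with the constant modified bit 0 appended, = A's frames
def pvEmb (M : List (Int × Int)) : List (Int × Int × Int) :=
  M.map (fun f => (f.1, f.2, 0))

-- loop invariant: in-memory pages are distinct and reference bits are 0/1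
def pvInv (M : List (Int × Int)) : Prop :=
  (M.map Prod.fst).Nodup ∧ ∀ f ∈ M, f.2 = 0 ∨ f.2 = 1

theorem pvMarkHit_eq_none (page : Int) (M : List (Int × Int))
    (h : page ∉ M.map Prod.fst) : pvMarkHit page M = none := by
  induction M with
  | nil => rfl
  | cons f rest ih =>
    simp only [List.map_cons, List.mem_cons] at h
    push Not at h
    simp [pvMarkHit, Ne.symm h.1, ih h.2]

theorem pvMap_if_id (page : Int) (M : List (Int × Int)) (h : page ∉ M.map Prod.fst) :
    M.map (fun f => if f.1 = page then (f.1, (1:Int)) else f) = M := by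
  induction M with
  | nil => rfl
  | cons f rest ih =>
    simp only [List.map_cons, List.mem_cons] at h
    push Not at h
    simp [Ne.symm h.1, ih h.2]

theorem pvMarkHit_eq_map (page : Int) (M : List (Int × Int))
    (h1 : (M.map Prod.fst).Nodup) (h2 : page ∈ M.map Prod.fst) :
    pvMarkHit page M = some (M.map (fun f => if f.1 = page then (f.1, (1:Int)) else f)) := by
  induction M with
  | nil => simp at h2
  | cons f rest ih =>
    simp only [List.map_cons, List.nodup_cons] at h1
    by_cases hf : f.1 = page
    · subst hf
      simp [pvMarkHit, pvMap_if_id f.1 rest h1.1]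
    · simp only [List.map_cons, List.mem_cons] at h2
      rcases h2 with h2 | h2
      · exact absurd h2.symm hf
      · simp [pvMarkHit, hf, ih h1.2 h2]

theorem pvRotA_eq (k : Nat) (L : List (Int × Int × Int)) (hk : k ≤ L.length) :
    pvRotA k L = L.drop k ++ (L.take k).map (fun f => (f.1, 0, f.2.2)) := by
  induction k generalizing L with
  | zero => simp [pvRotA]
  | succ k ih =>
    match L with
    | [] => simp at hk
    | h :: t =>
      simp only [List.length_cons, Nat.succ_le_succ_iff] at hk
      show pvRotA k (t ++ [(h.1, 0, h.2.2)]) = _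
      rw [ih _ (by simp; omega)]
      simp [List.drop_append_of_le_length hk, List.take_append_of_le_length hk]

theorem pvSortedHead_eq {α κ : Type} [LinearOrder κ] (L : List α) (key : α → κ) (t0 : α) (tl : List α)
    (hs : PySem.List.sorted L key = t0 :: tl) (e : α) (he : e ∈ L)
    (hmin : ∀ y ∈ L, key e ≤ key y) (huniq : ∀ y ∈ L, key y = key e → y = e) : t0 = e := by
  have ht0 : t0 ∈ L := (PySem.List.mem_sorted L key false t0).mp (by rw [hs]; exact List.mem_cons_self)
  exact huniq t0 ht0 (le_antisymm (hmin t0 ht0) (PySem.List.key_head_sorted_le L key hs e he)).symm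

theorem pvTemp0_eq (M : List (Int × Int)) :
    ((PySem.List.pyRange 0 ((pvEmb M).length : Int)).foldl
      (fun acc i => acc ++ [(let e := PySem.List.pyGetD (pvEmb M) i ((0:Int), (0:Int), (0:Int)); (e.1, e.2.1, e.2.2, i))]) [])
    = M.zipIdx.map (fun q => (q.1.1, q.1.2, (0:Int), (q.2 : Int))) := by
  rw [PySem.List.foldl_append_singleton_eq_map]
  have h1 : ((pvEmb M).length : Int) = PySem.List.len (pvEmb M) := by simp [PySem.List.len]
  rw [h1]
  have h2 := PySem.List.enumerate_eq_map_pyRange (pvEmb M) ((0:Int),(0:Int),(0:Int))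
  have h3 : (PySem.List.pyRange 0 (PySem.List.len (pvEmb M))).map
      (fun i => (let e := PySem.List.pyGetD (pvEmb M) i ((0:Int), (0:Int), (0:Int)); (e.1, e.2.1, e.2.2, i)))
      = (PySem.List.enumerate (pvEmb M)).map (fun q => (q.2.1, q.2.2.1, q.2.2.2, q.1)) := by
    rw [h2, List.map_map]; rfl
  rw [h3, PySem.List.enumerate_eq_zipIdx_map, pvEmb, List.zipIdx_map, List.map_map, List.map_map]
  simp [Function.comp_def]

theorem pvMem_temp (M : List (Int × Int)) (y : Int × Int × Int × Int) :
    y ∈ M.zipIdx.map (fun q => (q.1.1, q.1.2, (0:Int), (q.2 : Int)))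
      ↔ ∃ (k : Nat) (hk : k < M.length), y = (M[k].1, M[k].2, (0:Int), (k:Int)) := by
  simp only [List.mem_map]
  constructor
  · rintro ⟨⟨f, k⟩, hf, rfl⟩
    have := List.mem_zipIdx_iff_getElem?.mp hf
    simp only [List.getElem?_eq_some_iff] at this
    obtain ⟨hk, hfk⟩ := this
    exact ⟨k, hk, by simp [hfk]⟩
  · rintro ⟨k, hk, rfl⟩
    exact ⟨(M[k], k), List.mem_zipIdx_iff_getElem?.mpr (by simp), rfl⟩
theorem pvKeyA_elem (M : List (Int × Int)) (k : Nat) (hk : k < M.length) :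
    pvKeyA (M[k].1, M[k].2, (0:Int), (k:Int)) = toLex (M[k].2, toLex ((0:Int), (k:Int))) := rfl

theorem pvHead_some (M : List (Int × Int)) (t0 : Int × Int × Int × Int) (tl : List (Int × Int × Int × Int))
    (hb : ∀ f ∈ M, f.2 = 0 ∨ f.2 = 1) (v : Nat) (hv : v < M.length) (hz : M[v].2 = 0)
    (hfirst : ∀ j (hj : j < v), (M[j]'(by omega)).2 ≠ 0)
    (hsort : PySem.List.sorted (M.zipIdx.map (fun q => (q.1.1, q.1.2, (0:Int), (q.2 : Int)))) pvKeyA = t0 :: tl) :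
    t0 = (M[v].1, (0:Int), (0:Int), (v:Int)) := by
  apply pvSortedHead_eq _ pvKeyA t0 tl hsort
  · exact (pvMem_temp M _).mpr ⟨v, hv, by rw [hz]⟩
  · intro y hy
    obtain ⟨k, hk, rfl⟩ := (pvMem_temp M y).mp hy
    rw [pvKeyA_elem M k hk]
    have he : pvKeyA (M[v].1, (0:Int), (0:Int), (v:Int)) = toLex ((0:Int), toLex ((0:Int), (v:Int))) := rfl
    rw [he, Prod.Lex.toLex_le_toLex]
    by_cases hk2 : M[k].2 = 0
    · right
      refine ⟨hk2.symm, ?_⟩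
      rw [Prod.Lex.toLex_le_toLex]
      right
      have hvk : v ≤ k := by
        by_contra hlt
        exact hfirst k (by omega) hk2
      exact ⟨rfl, by show (v:Int) ≤ (k:Int); exact_mod_cast hvk⟩
    · left
      rcases hb M[k] (List.getElem_mem hk) with h0 | h1
      · exact absurd h0 hk2
      · rw [h1]; norm_num
  · intro y hy hkey
    obtain ⟨k, hk, rfl⟩ := (pvMem_temp M y).mp hy
    rw [pvKeyA_elem M k hk] at hkey
    have he : pvKeyA (M[v].1, (0:Int), (0:Int), (v:Int)) = toLex ((0:Int), toLex ((0:Int), (v:Int))) := rfl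
    rw [he] at hkey
    have h1 := toLex.injective hkey
    have h2 : M[k].2 = 0 := congrArg Prod.fst h1
    have h3 := toLex.injective (congrArg Prod.snd h1)
    have h4 : (k : Int) = (v : Int) := congrArg Prod.snd h3
    have h5 : k = v := by exact_mod_cast h4
    subst h5
    rw [h2]

theorem pvHead_none (M : List (Int × Int)) (t0 : Int × Int × Int × Int) (tl : List (Int × Int × Int × Int))
    (hb : ∀ f ∈ M, f.2 = 1) (h0 : 0 < M.length)
    (hsort : PySem.List.sorted (M.zipIdx.map (fun q => (q.1.1, q.1.2, (0:Int), (q.2 : Int)))) pvKeyA = t0 :: tl) :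
    t0 = ((M[0]'h0).1, (1:Int), (0:Int), (0:Int)) := by
  apply pvSortedHead_eq _ pvKeyA t0 tl hsort
  · exact (pvMem_temp M _).mpr ⟨0, h0, by rw [hb (M[0]'h0) (List.getElem_mem h0)]; norm_num⟩
  · intro y hy
    obtain ⟨k, hk, rfl⟩ := (pvMem_temp M y).mp hy
    rw [pvKeyA_elem M k hk, hb M[k] (List.getElem_mem hk)]
    have he : pvKeyA ((M[0]'h0).1, (1:Int), (0:Int), (0:Int)) = toLex ((1:Int), toLex ((0:Int), (0:Int))) := rfl
    rw [he, Prod.Lex.toLex_le_toLex]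
    right
    refine ⟨rfl, ?_⟩
    rw [Prod.Lex.toLex_le_toLex]
    right
    exact ⟨rfl, by show ((0:Nat):Int) ≤ (k:Int); positivity⟩
  · intro y hy hkey
    obtain ⟨k, hk, rfl⟩ := (pvMem_temp M y).mp hy
    rw [pvKeyA_elem M k hk] at hkey
    have he : pvKeyA ((M[0]'h0).1, (1:Int), (0:Int), (0:Int)) = toLex ((1:Int), toLex ((0:Int), (0:Int))) := rfl
    rw [he] at hkey
    have h1 := toLex.injective hkey
    have h3 := toLex.injective (congrArg Prod.snd h1)
    have h4 : (k : Int) = (0 : Int) := congrArg Prod.snd h3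
    have h5 : k = 0 := by exact_mod_cast h4
    subst h5
    rw [hb (M[0]'hk) (List.getElem_mem hk)]
    norm_num
theorem pvAny_false (page : Int) (M : List (Int × Int)) (h : page ∉ M.map Prod.fst) :
    (pvEmb M).any (fun f => f.1 == page) = false := by
  simp only [pvEmb, List.any_map, List.any_eq_false, Function.comp_apply]
  intro f hf hc
  exact h (List.mem_map.mpr ⟨f, hf, by simpa using hc⟩)

theorem pvAny_true (page : Int) (M : List (Int × Int)) (h : page ∈ M.map Prod.fst) :
    (pvEmb M).any (fun f => f.1 == page) = true := by
  simp only [List.mem_map] at h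
  obtain ⟨f, hf, rfl⟩ := h
  simp only [pvEmb, List.any_map, List.any_eq_true]
  exact ⟨f, hf, by simp⟩

theorem pvStep_eq (size page : Int) (hsz : size ≠ 0) (M : List (Int × Int)) (c : Int)
    (hI : pvInv M) :
    pvStepA size (pvEmb M, c) page
      = (pvEmb (pvStepB size (M, c) page).1, (pvStepB size (M, c) page).2)
    ∧ pvInv (pvStepB size (M, c) page).1 := by
  obtain ⟨hnd, hb⟩ := hI
  by_cases hpm : page ∈ M.map Prod.fst
  · -- hit: A's final branch sets the bit of the (unique) matching frame; B's pvMarkHit does too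
    have hmk := pvMarkHit_eq_map page M hnd hpm
    have hany := pvAny_true page M hpm
    have hmapeq : (pvEmb M).map (fun f => if f.1 = page then (f.1, (1:Int), f.2.2) else f)
        = pvEmb (M.map (fun f => if f.1 = page then (f.1, (1:Int)) else f)) := by
      simp only [pvEmb, List.map_map]
      apply List.map_congr_left
      intro f _
      by_cases h : f.1 = page <;> simp [h]
    have hfst : (M.map (fun f => if f.1 = page then (f.1, (1:Int)) else f)).map Prod.fst
        = M.map Prod.fst := by
      rw [List.map_map]
      apply List.map_congr_left
      intro f _
      by_cases h : f.1 = page <;> simp [h]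
    refine ⟨?_, ?_⟩
    · simp only [pvStepA, pvStepB, hmk, hany]
      rw [if_neg (by simp), if_neg (by simp)]
      rw [hmapeq]
    · simp only [pvStepB, hmk]
      refine ⟨by rw [hfst]; exact hnd, ?_⟩
      intro f hf
      simp only [List.mem_map] at hf
      obtain ⟨g, hg, rfl⟩ := hf
      by_cases h : g.1 = page
      · simp [h]
      · simp only [if_neg h]
        exact hb g hg
  · -- miss
    have hmk := pvMarkHit_eq_none page M hpm
    have hany := pvAny_false page M hpm
    have hlen : (pvEmb M).length = M.length := by simp [pvEmb]
    by_cases hlt : (M.length : Int) < size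
    · -- free frame: append
      refine ⟨?_, ?_⟩
      · simp only [pvStepA, pvStepB, hmk, hany, hlen]
        rw [if_pos (by exact ⟨trivial, hlt⟩), if_pos hlt]
        simp [pvEmb]
      · simp only [pvStepB, hmk]
        rw [if_pos hlt]
        refine ⟨?_, ?_⟩
        · simp only [List.map_append, List.map_cons, List.map_nil]
          rw [List.nodup_append]
          refine ⟨hnd, List.nodup_singleton _, ?_⟩
          intro a ha b hbmem
          have hbp : b = page := by simpa using hbmem
          subst hbp
          intro hc
          subst hc
          exact hpm ha
        · intro f hf
          rcases List.mem_append.mp hf with h | h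
          · exact hb f h
          · simp at h; subst h; right; rfl
    · by_cases heq : (M.length : Int) = size
      · -- eviction
        have hM0 : 0 < M.length := by
          rcases Nat.eq_zero_or_pos M.length with h | h
          · exact absurd (by rw [← heq, h]; rfl) hsz
          · exact h
        have hT := pvTemp0_eq M
        rw [hlen] at hT
        have hlt' : ¬ (M.length : Int) < size := hlt
        rcases hs : PySem.List.sorted (M.zipIdx.map (fun q => (q.1.1, q.1.2, (0:Int), (q.2 : Int)))) pvKeyA with _ | ⟨t0, tl⟩
        · exfalso
          rw [PySem.List.sorted_eq_nil_iff] at hs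
          simp only [List.map_eq_nil_iff, List.zipIdx_eq_nil_iff] at hs
          subst hs
          simp at hM0
        rcases hfz : M.findIdx? (fun f => f.2 == 0) with _ | v
        · -- all reference bits set: victim defaults to 0, bits are cleared
          have hall : ∀ f ∈ M, f.2 = 1 := by
            intro f hf
            rcases hb f hf with h0 | h1
            · have hfalse := List.findIdx?_eq_none_iff.mp hfz f hf
              rw [h0] at hfalse
              simp at hfalse
            · exact h1
          have ht0 := pvHead_none M t0 tl hall hM0 hs
          subst ht0
          have hget : PySem.List.pyGet? M ((0:Nat) : Int) = some (M[0]'hM0) := by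
            rw [PySem.List.pyGet?_natCast]
            simp
          constructor
          · simp only [pvStepA, pvStepB, hmk, hany, hlen, hT, hs, hfz]
            rw [if_neg (by rintro ⟨_, h⟩; exact hlt' h), if_pos ⟨trivial, heq⟩,
              if_neg hlt', if_pos heq]
            simp only [Option.getD_none, hget]
            rw [(hall (M[0]'hM0) (List.getElem_mem hM0) : (M[0]'hM0).2 = 1), if_pos rfl]
            have hge : (pvEmb M)[0]'(by rw [hlen]; exact hM0) = (M[0].1, (1:Int), (0:Int)) := by
              simp only [pvEmb, List.getElem_map]
              rw [hall (M[0]'hM0) (List.getElem_mem hM0)]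
            have hdec : pvEmb M = (M[0].1, (1:Int), (0:Int)) :: (pvEmb M).drop 1 := by
              have h := List.drop_eq_getElem_cons (i := 0) (l := pvEmb M) (by rw [hlen]; exact hM0)
              rw [List.drop_zero, hge] at h
              exact h
            have hidx : PySem.List.index? (pvEmb M) (M[0].1, (1:Int), (0:Int)) = some 0 := by
              rw [hdec]
              exact PySem.List.index?_cons_self _ _
            rw [hidx]
            simp only [Option.getD_some, if_true]
            show (match (List.map (fun f => (f.1, (0:Int), f.2.2)) (pvEmb M)) with
              | [] => ([(page, 1, 0)], c + 1)
              | head :: rest => (rest ++ [(page, 1, 0)], c + 1)) = _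
            conv_lhs => rw [hdec, List.map_cons]
            simp [pvEmb, List.map_map, Function.comp_def]
          · simp only [pvStepB, hmk, hfz]
            rw [if_neg hlt', if_pos heq]
            simp only [Option.getD_none, hget]
            rw [(hall (M[0]'hM0) (List.getElem_mem hM0) : (M[0]'hM0).2 = 1), if_pos rfl]
            have hfsts : (((M.map (fun f => (f.1, (0:Int)))).drop 1
                ++ ((M.map (fun f => (f.1, (0:Int)))).take 0).map (fun f => (f.1, (0:Int)))
                ++ [(page, (1:Int))]).map Prod.fst)
                = (M.map Prod.fst).drop 1 ++ [page] := by
              simp [← List.map_drop, List.map_map, Function.comp_def]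
            constructor
            · rw [hfsts, List.nodup_append]
              refine ⟨(List.drop_sublist 1 (M.map Prod.fst)).nodup hnd, List.nodup_singleton _, ?_⟩
              intro a ha b hbmem
              have hbp : b = page := by simpa using hbmem
              subst hbp
              intro hc
              subst hc
              exact hpm (List.mem_of_mem_drop ha)
            · intro f hf
              rcases List.mem_append.mp hf with h | h
              · rcases List.mem_append.mp h with h' | h'
                · obtain ⟨g, _, rfl⟩ := List.mem_map.mp
                    (List.mem_of_mem_tail (by simpa using h'))
                  left; rfl
                · simp at h'
              · simp at h; subst h; right; rfl
        · -- first frame with reference bit 0 is the victim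
          obtain ⟨hv, hpv, hfirst⟩ := List.findIdx?_eq_some_iff_getElem.mp hfz
          have hz : M[v].2 = 0 := by simpa using hpv
          have hfirst' : ∀ j (hj : j < v), (M[j]'(by omega)).2 ≠ 0 := by
            intro j hj hc
            exact (hfirst j hj) (by simp [hc])
          have ht0 := pvHead_some M t0 tl hb v hv hz hfirst' hs
          subst ht0
          have hget : PySem.List.pyGet? M ((v:Nat) : Int) = some (M[v]'hv) := by
            rw [PySem.List.pyGet?_natCast]
            simp [hv]
          have hvE : v < (pvEmb M).length := by rw [hlen]; exact hv
          have hgeV : (pvEmb M)[v]'hvE = (M[v].1, (0:Int), (0:Int)) := by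
            simp only [pvEmb, List.getElem_map]
            rw [hz]
          have hidx : PySem.List.index? (pvEmb M) (M[v].1, (0:Int), (0:Int)) = some v := by
            rw [PySem.List.index?_eq_some_iff]
            refine ⟨(pvEmb M).take v, (pvEmb M).drop (v+1), ?_, by simp [hlen]; omega, ?_⟩
            · conv_lhs => rw [← List.take_append_drop v (pvEmb M)]
              rw [List.drop_eq_getElem_cons hvE, hgeV]
            · intro hmem
              rw [List.mem_take_iff_getElem] at hmem
              obtain ⟨j, hj, hjy⟩ := hmem
              have hjv : j < v := by omega
              have hj2 : (M[j]'(by omega)).2 = 0 := by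
                have := congrArg (fun t => t.2.1) hjy
                simpa [pvEmb] using this
              exact hfirst' j hjv hj2
          constructor
          · simp only [pvStepA, pvStepB, hmk, hany, hlen, hT, hs, hfz]
            rw [if_neg (by rintro ⟨_, h⟩; exact hlt' h), if_pos ⟨trivial, heq⟩,
              if_neg hlt', if_pos heq]
            rw [hidx]
            simp only [Option.getD_some, hget]
            rw [if_neg (by norm_num), if_neg (by rw [hz]; norm_num)]
            rw [pvRotA_eq v (pvEmb M) (by rw [hlen]; omega)]
            rw [List.drop_eq_getElem_cons hvE, hgeV, List.cons_append]
            simp [pvEmb, List.map_take, List.map_map, Function.comp_def, List.append_assoc]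
          · simp only [pvStepB, hmk, hfz]
            rw [if_neg hlt', if_pos heq]
            simp only [Option.getD_some, hget]
            rw [if_neg (by rw [hz]; norm_num)]
            have hfsts : ((M.drop (v+1) ++ (M.take v).map (fun f => (f.1, (0:Int))) ++ [(page, (1:Int))]).map Prod.fst)
                = (M.map Prod.fst).drop (v+1) ++ ((M.map Prod.fst).take v ++ [page]) := by
              simp [← List.map_drop, ← List.map_take, List.map_map, Function.comp_def,
                List.append_assoc]
            constructor
            · rw [hfsts, ← List.append_assoc, List.nodup_append]
              have hFlen : v < (M.map Prod.fst).length := by simpa using hv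
              have h1 : ((M.map Prod.fst).take v ++ (M.map Prod.fst).drop (v+1)).Nodup := by
                have hsub : List.Sublist ((M.map Prod.fst).take v ++ (M.map Prod.fst).drop (v+1)) (M.map Prod.fst) := by
                  conv_rhs => rw [← List.take_append_drop v (M.map Prod.fst),
                    List.drop_eq_getElem_cons hFlen]
                  exact ((List.drop (v+1) (M.map Prod.fst)).sublist_cons_self _).append_left _
                exact hsub.nodup hnd
              have h2 : ((M.map Prod.fst).drop (v+1) ++ (M.map Prod.fst).take v).Nodup :=
                (List.perm_append_comm).nodup h1
              refine ⟨h2, List.nodup_singleton _, ?_⟩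
              intro a ha b hbmem
              have hbp : b = page := by simpa using hbmem
              subst hbp
              intro hc
              subst hc
              rcases List.mem_append.mp ha with h | h
              · exact hpm (List.mem_of_mem_drop h)
              · exact hpm (List.mem_of_mem_take h)
            · intro f hf
              rcases List.mem_append.mp hf with h | h
              · rcases List.mem_append.mp h with h' | h'
                · exact hb f (List.mem_of_mem_drop h')
                · obtain ⟨g, _, rfl⟩ := List.mem_map.mp h'
                  left; rfl
              · simp at h; subst h; right; rfl
      · -- size < 0 degenerate path: A's bit-setting loop matches nothing, B passes
        refine ⟨?_, ?_⟩
        · simp only [pvStepA, pvStepB, hmk, hany, hlen]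
          rw [if_neg (by rintro ⟨_, h⟩; exact hlt h), if_neg (by rintro ⟨_, h⟩; exact heq h),
            if_neg hlt, if_neg heq]
          have : (pvEmb M).map (fun f => if f.1 = page then (f.1, (1:Int), f.2.2) else f)
              = pvEmb M := by
            have := pvMap_if_id page M hpm
            simp only [pvEmb, List.map_map]
            apply List.map_congr_left
            intro f hf
            have hf1 : f.1 ≠ page := by
              intro hc
              exact hpm (List.mem_map.mpr ⟨f, hf, hc⟩)
            simp [hf1]
          rw [this]
        · simp only [pvStepB, hmk]
          rw [if_neg hlt, if_neg heq]
          exact ⟨hnd, hb⟩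

theorem pvFold_eq (size : Int) (hsz : size ≠ 0) (pages : List Int) :
    ∀ (M : List (Int × Int)) (c : Int), pvInv M →
    pages.foldl (pvStepA size) (pvEmb M, c)
      = (pvEmb (pages.foldl (pvStepB size) (M, c)).1, (pages.foldl (pvStepB size) (M, c)).2) := by
  induction pages with
  | nil => intro M c _; simp
  | cons p ps ih =>
    intro M c hI
    have h := pvStep_eq size p hsz M c hI
    simp only [List.foldl_cons, h.1]
    exact ih _ _ h.2

-- ===== VERDICT (by name: the statement is the Claim_ definition above) =====
theorem page_replace_spec : Claim_equal_page_replace := by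
  intro size pages _ hpre
  unfold Spec_page_replace
  rcases hpre with hsz | hnil
  · have h := pvFold_eq size hsz pages [] 0 (by exact ⟨List.nodup_nil, by simp⟩)
    simp only [page_replace, page_replace_alt]
    rw [show ([] : List (Int × Int × Int)) = pvEmb [] from rfl, h]
  · subst hnil; rfl
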